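-- pv_equiv track=rewrite | github.com/jeekim2/algostudy_ind | Problems_softeer/628/ans_628_JHK.py | cnt_server
-- ===== SOURCE A (Python) =====
-- def bs(usage, resource, left):
--     right = len(usage) - 1
--     while right - left > 1:
--         mid = (right + left) // 2
--         if usage[mid] <= resource:
--             right = mid
--         else:
--             left = mid
--     return left
--
-- def set_usage(usage, is_visisted, resource, startidx):
--     if startidx >= len(usage):
--         return
--     idx = bs(usage, resource, startidx)
--     for i in range(idx, len(usage)):
--         if not is_visisted[i]:
--             if usage[i] < resource:
--                 is_visisted[i] = True
--                 set_usage(usage, is_visisted, resource - usage[i], i + 1)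
--                 return
--             if usage[i] == resource:
--                 is_visisted[i] = True
--                 return
--
-- def cnt_server(usage):
--     cnt = 0
--     is_visisted = [False] * len(usage)
--     for i in range(len(usage)):
--         if not is_visisted[i]:
--             cnt += 1
--             reserved = 900
--             is_visisted[i] = True
--             set_usage(usage, is_visisted, reserved - usage[i], i + 1)
--
--     return cnt
-- ===== SOURCE B (Python) =====
-- def bs(usage, resource, left):
--     right = len(usage) - 1
--     while right - left > 1:
--         mid = (right + left) // 2
--         if usage[mid] <= resource:
--             right = mid
--         else:
--             left = mid
--     return left
--
-- def set_usage(usage, is_visisted, resource, startidx):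
--     # iterative version: threads the recursion's (resource, startidx) through loop variables
--     while startidx < len(usage):
--         idx = bs(usage, resource, startidx)
--         moved = False
--         for i in range(idx, len(usage)):
--             if not is_visisted[i]:
--                 u = usage[i]
--                 if u < resource:
--                     is_visisted[i] = True
--                     resource -= u
--                     startidx = i + 1
--                     moved = True
--                     break
--                 if u == resource:
--                     is_visisted[i] = True
--                     return
--         if not moved:
--             return
--
-- def cnt_server(usage):
--     cnt = 0
--     is_visisted = [False] * len(usage)
--     for i in range(len(usage)):
--         if not is_visisted[i]:
--             cnt += 1
--             reserved = 900
--             is_visisted[i] = True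
--             set_usage(usage, is_visisted, reserved - usage[i], i + 1)
--     return cnt
-- ===== Notes on version B (the rewrite author's own statement) =====
-- stated objective: alternative
-- what changed: set_usage's tail recursion is replaced by an explicit while loop that threads (resource, startidx) through loop variables, so the chained fills run in constant stack depth instead of one Python stack frame per marked element.
import Mathlib
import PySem

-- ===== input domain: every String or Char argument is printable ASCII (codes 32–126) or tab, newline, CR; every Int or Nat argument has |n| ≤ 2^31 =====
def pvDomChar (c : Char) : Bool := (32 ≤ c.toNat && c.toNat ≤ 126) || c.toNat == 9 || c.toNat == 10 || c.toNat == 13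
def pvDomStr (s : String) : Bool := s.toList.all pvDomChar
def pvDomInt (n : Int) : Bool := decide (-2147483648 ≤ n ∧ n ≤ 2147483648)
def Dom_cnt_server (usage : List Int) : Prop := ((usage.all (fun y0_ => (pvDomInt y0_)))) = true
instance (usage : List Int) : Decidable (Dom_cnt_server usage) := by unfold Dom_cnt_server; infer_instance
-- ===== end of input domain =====

-- B replaces set_usage's tail recursion by an explicit while loop threading (resource, startidx); same cost, constant stack depth.


-- ===== PORT A =====
-- bs: the shared binary-search helper, ported with a fuel loop (the gap right-left shrinks each step; fuel len+2 always suffices)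
def bsGo (usage : List Int) (resource : Int) : Nat → Int → Int → Int
  | 0, left, _ => left
  | f + 1, left, right =>
    if right - left > 1 then
      let mid := PySem.Int.floordiv (right + left) 2
      if PySem.List.pyGetD usage mid 0 ≤ resource then bsGo usage resource f left mid
      else bsGo usage resource f mid right
    else left

def bsA (usage : List Int) (resource : Int) (left : Int) : Int :=
  bsGo usage resource (usage.length + 2) left ((usage.length : Int) - 1)

-- set_usage of A: the for-loop with early returns is innerA, the recursion is setUsageA (fuel = remaining depth bound)
mutual
def setUsageA (usage : List Int) : Nat → List Bool → Int → Int → List Bool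
  | 0, vis, _, _ => vis
  | Nat.succ f, vis, resource, startidx =>
    if startidx ≥ (usage.length : Int) then vis
    else innerA usage f (PySem.List.pyRange (bsA usage resource startidx) (usage.length : Int) 1) vis resource
termination_by f _ _ _ => (f, 0)

def innerA (usage : List Int) : Nat → List Int → List Bool → Int → List Bool
  | _, [], vis, _ => vis
  | f, i :: rest, vis, resource =>
    if PySem.List.pyGetD vis i false = false then
      if PySem.List.pyGetD usage i 0 < resource then
        setUsageA usage f (PySem.List.pySetD vis i true) (resource - PySem.List.pyGetD usage i 0) (i + 1)
      else if PySem.List.pyGetD usage i 0 = resource then PySem.List.pySetD vis i true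
      else innerA usage f rest vis resource
    else innerA usage f rest vis resource
termination_by f l _ _ => (f, l.length + 1)
end

def cnt_server (usage : List Int) : Int :=
  (((List.range usage.length).foldl (fun (st : Int × List Bool) i =>
      if st.2.getD i false = false then
        (st.1 + 1,
         setUsageA usage (usage.length + 1) (st.2.set i true)
           (900 - PySem.List.pyGetD usage (i : Int) 0) ((i : Int) + 1))
      else st)
    (0, List.replicate usage.length false))).1

-- ===== PORT B =====
-- B's inner for-loop: inl vis = the loop returns; inr (vis, resource, startidx) = break and continue the while loop
def scanB (usage : List Int) : List Int → List Bool → Int → (List Bool) ⊕ (List Bool × Int × Int)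
  | [], vis, _ => Sum.inl vis
  | i :: rest, vis, resource =>
    if PySem.List.pyGetD vis i false = false then
      let u := PySem.List.pyGetD usage i 0
      if u < resource then Sum.inr (PySem.List.pySetD vis i true, resource - u, i + 1)
      else if u = resource then Sum.inl (PySem.List.pySetD vis i true)
      else scanB usage rest vis resource
    else scanB usage rest vis resource

-- B's while loop, fuel-bounded (startidx strictly increases, so fuel len+1 suffices)
def whileB (usage : List Int) : Nat → List Bool → Int → Int → List Bool
  | 0, vis, _, _ => vis
  | f + 1, vis, resource, startidx =>
    if startidx < (usage.length : Int) then
      match scanB usage (PySem.List.pyRange (bsA usage resource startidx) (usage.length : Int) 1) vis resource with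
      | Sum.inl vis' => vis'
      | Sum.inr (vis', r', s') => whileB usage f vis' r' s'
    else vis

def cnt_server_alt (usage : List Int) : Int :=
  (((List.range usage.length).foldl (fun (st : Int × List Bool) i =>
      if st.2.getD i false = false then
        (st.1 + 1,
         whileB usage (usage.length + 1) (st.2.set i true)
           (900 - PySem.List.pyGetD usage (i : Int) 0) ((i : Int) + 1))
      else st)
    (0, List.replicate usage.length false))).1

-- ===== PRECONDITION & SPEC =====
def Spec_cnt_server (usage : List Int) (out : Int) : Prop := out = cnt_server_alt usage
instance (usage : List Int) (out : Int) : Decidable (Spec_cnt_server usage out) := by unfold Spec_cnt_server; infer_instance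

-- ===== CLAIM (what is proved, stated in full; the proofs are below) =====
def Claim_equal_cnt_server : Prop := ∀ (usage : List Int), Dom_cnt_server usage → Spec_cnt_server usage (cnt_server usage)

-- ===== LEMMAS AND PROOFS =====

-- A's for-loop equals B's scan, with the recursive continuation spelled out
theorem innerA_eq_scanB (usage : List Int) (f : Nat) (l : List Int) (vis : List Bool) (resource : Int) :
    innerA usage f l vis resource =
      (match scanB usage l vis resource with
       | Sum.inl v => v
       | Sum.inr (v, r', s') => setUsageA usage f v r' s') := by
  induction l generalizing vis resource with
  | nil => simp [innerA, scanB]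
  | cons i rest ih =>
    simp only [innerA, scanB]
    split_ifs with h1 h2 h3 <;> simp [ih]

-- the recursion and the while loop agree for every fuel
theorem setUsageA_eq_whileB (usage : List Int) (f : Nat) (vis : List Bool) (resource startidx : Int) :
    setUsageA usage f vis resource startidx = whileB usage f vis resource startidx := by
  induction f generalizing vis resource startidx with
  | zero => simp [setUsageA, whileB]
  | succ f ih =>
    simp only [setUsageA, whileB, innerA_eq_scanB]
    by_cases h : startidx ≥ (usage.length : Int)
    · rw [if_pos h, if_neg (by omega)]
    · rw [if_neg h, if_pos (by omega)]
      cases scanB usage (PySem.List.pyRange (bsA usage resource startidx) (usage.length : Int) 1) vis resource with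
      | inl v => rfl
      | inr t => exact ih t.1 t.2.1 t.2.2

-- ===== VERDICT (by name: the statement is the Claim_ definition above) =====
theorem cnt_server_spec : Claim_equal_cnt_server := by
  intro usage _
  unfold Spec_cnt_server cnt_server cnt_server_alt
  simp only [setUsageA_eq_whileB]
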